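-- pv_equiv track=rewrite | github.com/YazonDA/CodeWars_task | CompletedTask/Decimal_to_Factorial_and_Back.py | factString2Dec
-- ===== SOURCE A (Python) =====
-- def factString2Dec(string):
-- 	char_list = []
-- 	for i in string[::-1]:
-- 		if i < 'A':
-- 			char_list.append(ord(i) - 48)
-- 		else:
-- 			char_list.append(ord(i) - 55)
-- 	ans = 0
-- 	i = x = 1
-- 	for j in char_list:
-- 		ans += j * i
-- 		i *= x
-- 		x += 1
-- 	return ans
-- ===== SOURCE B (Python) =====
-- def factString2Dec(string):
--     n = len(string)
--     ans = 0
--     for idx, ch in enumerate(string):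
--         d = ord(ch) - 48 if ch < 'A' else ord(ch) - 55
--         ans = ans * (n - idx) + d
--     return ans
-- ===== Notes on version B (the rewrite author's own statement) =====
-- stated objective: simpler
-- what changed: B replaces A's reversal + digit-list build + explicit factorial-weight accumulation with a single left-to-right Horner pass over the factorial number system (ans = ans*(n-idx) + digit), keeping one accumulator and no intermediate list.
import Mathlib
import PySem

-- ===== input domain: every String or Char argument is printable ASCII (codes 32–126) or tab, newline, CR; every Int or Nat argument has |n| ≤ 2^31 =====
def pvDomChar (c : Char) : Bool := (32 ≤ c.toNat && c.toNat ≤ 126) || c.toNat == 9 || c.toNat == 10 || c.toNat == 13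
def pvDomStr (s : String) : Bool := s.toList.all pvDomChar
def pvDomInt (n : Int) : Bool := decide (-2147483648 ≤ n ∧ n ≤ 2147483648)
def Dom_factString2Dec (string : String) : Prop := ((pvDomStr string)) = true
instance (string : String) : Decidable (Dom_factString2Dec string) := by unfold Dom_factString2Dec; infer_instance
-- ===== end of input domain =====

-- B replaces A's reversal + digit list + running-factorial accumulation with one left-to-right
-- Horner pass (ans = ans*(n-idx) + digit); objective: simpler, same O(n) cost.

-- ===== PORT A =====
-- literal transliteration of A: build char_list from string[::-1], then the weighted loop
def factString2Dec (string : String) : Int :=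
  -- string[::-1] via slice?; step -1 never fails, getD is unreachable
  let rev : String := (PySem.Str.slice? string none none (-1)).getD ""
  let char_list : List Int :=
    rev.toList.foldl
      (fun acc i =>
        if i < 'A' then acc ++ [((i.toNat : Int) - 48)]
        else acc ++ [((i.toNat : Int) - 55)]) []
  -- state (ans, i, x), started at (0, 1, 1)
  let res : Int × Int × Int :=
    char_list.foldl
      (fun s j => (s.1 + j * s.2.1, s.2.1 * s.2.2, s.2.2 + 1)) (0, 1, 1)
  res.1

-- ===== PORT B =====
-- transliteration of B: n = len(string); Horner fold over enumerate(string)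
def factString2Dec_alt (string : String) : Int :=
  let n : Int := (string.toList.length : Int)
  (PySem.List.enumerate string.toList).foldl
    (fun ans p =>
      ans * (n - p.1) +
        (if p.2 < 'A' then ((p.2.toNat : Int) - 48) else ((p.2.toNat : Int) - 55))) 0

-- ===== PRECONDITION & SPEC =====
def Spec_factString2Dec (string : String) (out : Int) : Prop := out = factString2Dec_alt string
instance (string : String) (out : Int) : Decidable (Spec_factString2Dec string out) := by unfold Spec_factString2Dec; infer_instance

-- ===== CLAIM (what is proved, stated in full; the proofs are below) =====
def Claim_equal_factString2Dec : Prop := ∀ (string : String), Dom_factString2Dec string → Spec_factString2Dec string (factString2Dec string)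

-- ===== LEMMAS AND PROOFS =====

-- digit map shared by the reasoning (both ports inline the same conditional)
def pvDg (c : Char) : Int := if c < 'A' then ((c.toNat : Int) - 48) else ((c.toNat : Int) - 55)

-- rising factorial: pvRf x k = x*(x+1)*…*(x+k-1)
def pvRf : Int → Nat → Int
  | _, 0 => 1
  | x, k+1 => x * pvRf (x+1) k

theorem pvRf_succ (x : Int) (k : Nat) : pvRf x (k+1) = pvRf x k * (x + k) := by
  induction k generalizing x with
  | zero => simp [pvRf]
  | succ k ih =>
      rw [show pvRf x (k+1+1) = x * pvRf (x+1) (k+1) from rfl, ih (x+1),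
        show pvRf x (k+1) = x * pvRf (x+1) k from rfl]
      push_cast; ring

-- A's first loop builds acc ++ map pvDg
theorem pvBuildA (l : List Char) (acc : List Int) :
    l.foldl
      (fun acc i =>
        if i < 'A' then acc ++ [((i.toNat : Int) - 48)]
        else acc ++ [((i.toNat : Int) - 55)]) acc = acc ++ l.map pvDg := by
  induction l generalizing acc with
  | nil => simp
  | cons c t ih =>
      simp only [List.foldl_cons, List.map_cons]
      by_cases h : c < 'A' <;> simp [h, ih, pvDg]

-- A's second loop: appending one digit adds j * (i * pvRf x len)
theorem pvA_append (l : List Int) (j ans i x : Int) :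
    ((l ++ [j]).foldl (fun (s : Int × Int × Int) j => (s.1 + j * s.2.1, s.2.1 * s.2.2, s.2.2 + 1)) (ans, i, x)).1
      = (l.foldl (fun (s : Int × Int × Int) j => (s.1 + j * s.2.1, s.2.1 * s.2.2, s.2.2 + 1)) (ans, i, x)).1
        + j * (i * pvRf x l.length) := by
  induction l generalizing ans i x with
  | nil => simp [pvRf]
  | cons a t ih =>
      simp only [List.cons_append, List.foldl_cons, ih, List.length_cons]
      rw [show pvRf x (t.length + 1) = x * pvRf (x+1) t.length from rfl]
      ring

-- bridge: B's Horner fold over enumerate equals ans·(len)! plus A's accumulation of the reversed digits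
theorem pvMain (l : List Char) (n s ans : Int) (hn : n = s + l.length) :
    (PySem.List.enumerate l s).foldl
      (fun ans p =>
        ans * (n - p.1) +
          (if p.2 < 'A' then ((p.2.toNat : Int) - 48) else ((p.2.toNat : Int) - 55))) ans
      = ans * pvRf 1 l.length
        + ((l.reverse.map pvDg).foldl
            (fun (s : Int × Int × Int) j => (s.1 + j * s.2.1, s.2.1 * s.2.2, s.2.2 + 1)) (0, 1, 1)).1 := by
  induction l generalizing s ans with
  | nil => simp [PySem.List.enumerate_nil, pvRf]
  | cons c t ih =>
      rw [PySem.List.enumerate_cons, List.foldl_cons,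
        ih (s+1) _ (by simp at hn ⊢; omega)]
      simp only [List.reverse_cons, List.map_append, List.map_cons, List.map_nil, pvA_append,
        List.length_map, List.length_reverse, List.length_cons, pvRf_succ 1 t.length]
      have hns : n - s = (t.length : Int) + 1 := by simp at hn; omega
      rw [hns]
      simp only [pvDg]
      ring

theorem factString2Dec_eq (string : String) : factString2Dec string = factString2Dec_alt string := by
  unfold factString2Dec factString2Dec_alt
  rw [PySem.Str.slice?_none_none_neg_one]
  simp only [Option.getD_some]
  rw [pvMain string.toList ((string.toList.length : Int)) 0 0 (by simp)]
  have hb := pvBuildA (String.ofList string.toList.reverse).toList ([] : List Int)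
  simp only [hb]
  simp

-- ===== VERDICT (by name: the statement is the Claim_ definition above) =====
theorem factString2Dec_spec : Claim_equal_factString2Dec := by
  intro s _
  unfold Spec_factString2Dec
  exact factString2Dec_eq s
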